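-- pv_equiv track=rewrite | github.com/HaifaAlsaif/2025-GP1-G5 | app.py | _derive_project_status_from_tasks
-- ===== SOURCE A (Python) =====
-- def _derive_project_status_from_tasks(task_statuses):
--     # task_statuses: list مثل ["pending","progress","completed"]
--     if not task_statuses:
--         return "pending"
--
--     if all(s == "completed" for s in task_statuses):
--         return "completed"
--
--     if any(s == "progress" for s in task_statuses):
--         return "progress"
--
--     return "pending"
-- ===== SOURCE B (Python) =====
-- # Map each status to a severity rank (completed=0, other/pending=1, progress=2),
-- # reduce with max, and index a lookup table with the result.
-- _RANK = {"completed": 0, "progress": 2}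
-- _STATUS_BY_RANK = ("completed", "pending", "progress")
--
-- def _derive_project_status_from_tasks(task_statuses):
--     if not task_statuses:
--         return "pending"
--     r = max(_RANK.get(s, 1) for s in task_statuses)
--     return _STATUS_BY_RANK[r]
-- ===== Notes on version B (the rewrite author's own statement) =====
-- stated objective: alternative
-- what changed: Instead of staged all()/any() predicate scans, B maps each status to a severity rank in a total order (completed=0, anything else=1, progress=2), reduces the list with max, and converts the maximal rank back to a status via a lookup table.
import Mathlib
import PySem

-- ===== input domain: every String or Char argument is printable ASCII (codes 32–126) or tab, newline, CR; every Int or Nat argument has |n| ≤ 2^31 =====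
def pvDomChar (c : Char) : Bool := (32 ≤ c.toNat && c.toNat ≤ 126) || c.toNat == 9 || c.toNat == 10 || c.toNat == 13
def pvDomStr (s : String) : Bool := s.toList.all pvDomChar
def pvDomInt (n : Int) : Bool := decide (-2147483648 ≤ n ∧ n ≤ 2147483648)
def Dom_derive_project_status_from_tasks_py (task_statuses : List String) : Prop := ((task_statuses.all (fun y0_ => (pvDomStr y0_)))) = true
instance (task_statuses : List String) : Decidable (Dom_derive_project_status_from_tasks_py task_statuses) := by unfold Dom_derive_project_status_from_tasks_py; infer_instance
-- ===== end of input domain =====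

-- B replaces A's staged all/any scans by a max-reduction over severity ranks
-- (completed=0, other=1, progress=2) followed by a rank→status table lookup (objective: alternative).

-- ===== PORT A =====
def derive_project_status_from_tasks_py (task_statuses : List String) : String :=
  if task_statuses.isEmpty then "pending"
  else if task_statuses.all (fun s => s == "completed") then "completed"
  else if task_statuses.any (fun s => s == "progress") then "progress"
  else "pending"

-- ===== PORT B =====
-- _RANK.get(s, 1): the two-entry dict lookup with default, as a direct test
def pvRank (s : String) : Nat :=
  if s == "completed" then 0 else if s == "progress" then 2 else 1

-- _STATUS_BY_RANK[r]: tuple indexing over the three valid ranks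
def pvStatusByRank (r : Nat) : String :=
  if r == 0 then "completed" else if r == 1 then "pending" else "progress"

def derive_project_status_from_tasks_py_alt (task_statuses : List String) : String :=
  match task_statuses.map pvRank with
  | [] => "pending"
  | h :: t => pvStatusByRank (t.foldl Nat.max h)

-- ===== PRECONDITION & SPEC =====
def Spec_derive_project_status_from_tasks_py (task_statuses : List String) (out : String) : Prop := out = derive_project_status_from_tasks_py_alt task_statuses
instance (task_statuses : List String) (out : String) : Decidable (Spec_derive_project_status_from_tasks_py task_statuses out) := by unfold Spec_derive_project_status_from_tasks_py; infer_instance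

-- ===== CLAIM =====
def Claim_equal_derive_project_status_from_tasks_py : Prop := ∀ (task_statuses : List String), Dom_derive_project_status_from_tasks_py task_statuses → Spec_derive_project_status_from_tasks_py task_statuses (derive_project_status_from_tasks_py task_statuses)

-- ===== LEMMAS AND PROOFS =====

theorem pv_foldl_max_shift (t : List Nat) (a : Nat) :
    t.foldl Nat.max a = Nat.max (t.foldl Nat.max 0) a := by
  induction t generalizing a with
  | nil => simp
  | cons x t ih =>
    simp only [List.foldl_cons]
    rw [ih (Nat.max a x), ih (Nat.max 0 x)]
    simp only [Nat.max_def]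
    split_ifs <;> omega

theorem pv_rank_zero (s : String) : pvRank s = 0 ↔ (s == "completed") = true := by
  unfold pvRank
  by_cases h : (s == "completed") = true <;> simp [h] <;> split <;> simp

theorem pv_rank_two (s : String) : pvRank s = 2 ↔ (s == "progress") = true := by
  unfold pvRank
  by_cases h : (s == "completed") = true
  · have : s = "completed" := by simpa using h
    subst this; simp
  · simp only [h, if_false]
    by_cases h2 : (s == "progress") = true <;> simp [h2]

theorem pv_M_le (xs : List String) : (xs.map pvRank).foldl Nat.max 0 ≤ 2 := by
  induction xs with
  | nil => simp
  | cons x t ih =>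
    simp only [List.map_cons, List.foldl_cons]
    rw [pv_foldl_max_shift]
    have : pvRank x ≤ 2 := by unfold pvRank; split <;> [omega; split <;> omega]
    simp only [Nat.max_def]
    split_ifs <;> omega

theorem pv_M_zero (xs : List String) :
    (xs.map pvRank).foldl Nat.max 0 = 0 ↔ (xs.all (fun s => s == "completed")) = true := by
  induction xs with
  | nil => simp
  | cons x t ih =>
    simp only [List.map_cons, List.foldl_cons, List.all_cons, Bool.and_eq_true]
    rw [pv_foldl_max_shift]
    constructor
    · intro h
      have h1 : pvRank x = 0 := by
        simp only [Nat.max_def] at h; split_ifs at h <;> omega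
      have h2 : (t.map pvRank).foldl Nat.max 0 = 0 := by
        simp only [Nat.max_def] at h; split_ifs at h <;> omega
      exact ⟨(pv_rank_zero x).mp h1, ih.mp h2⟩
    · rintro ⟨h1, h2⟩
      have := (pv_rank_zero x).mpr h1
      have := ih.mpr h2
      simp only [Nat.max_def]
      split_ifs <;> omega

theorem pv_M_two (xs : List String) :
    2 ≤ (xs.map pvRank).foldl Nat.max 0 ↔ (xs.any (fun s => s == "progress")) = true := by
  induction xs with
  | nil => simp
  | cons x t ih =>
    simp only [List.map_cons, List.foldl_cons, List.any_cons, Bool.or_eq_true]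
    rw [pv_foldl_max_shift]
    have hle : pvRank x ≤ 2 := by unfold pvRank; split <;> [omega; split <;> omega]
    constructor
    · intro h
      by_cases hx : pvRank x = 2
      · exact Or.inl ((pv_rank_two x).mp hx)
      · refine Or.inr (ih.mp ?_)
        simp only [Nat.max_def] at h; split_ifs at h <;> omega
    · rintro (h | h)
      · have := (pv_rank_two x).mpr h
        simp only [Nat.max_def]; split_ifs <;> omega
      · have := ih.mpr h
        simp only [Nat.max_def]; split_ifs <;> omega

-- ===== VERDICT =====
theorem derive_project_status_from_tasks_py_spec : Claim_equal_derive_project_status_from_tasks_py := by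
  intro xs _
  unfold Spec_derive_project_status_from_tasks_py derive_project_status_from_tasks_py derive_project_status_from_tasks_py_alt
  rcases xs with _ | ⟨x, t⟩
  · rfl
  · have hne : ((x :: t).isEmpty) = false := by simp
    simp only [hne, Bool.false_eq_true, if_false, List.map_cons]
    have hM : (t.map pvRank).foldl Nat.max (pvRank x)
        = ((x :: t).map pvRank).foldl Nat.max 0 := by
      simp only [List.map_cons, List.foldl_cons]
      rw [pv_foldl_max_shift, pv_foldl_max_shift (t.map pvRank) (Nat.max 0 (pvRank x))]
      simp only [Nat.max_def]
      split_ifs <;> omega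
    have hle := pv_M_le (x :: t)
    by_cases hall : ((x :: t).all (fun s => s == "completed")) = true
    · have h0 : (t.map pvRank).foldl Nat.max (pvRank x) = 0 :=
        hM.trans ((pv_M_zero (x :: t)).mpr hall)
      simp [hall, pvStatusByRank, h0]
    · have h0 : ((x :: t).map pvRank).foldl Nat.max 0 ≠ 0 :=
        fun h => hall ((pv_M_zero (x :: t)).mp h)
      by_cases hany : ((x :: t).any (fun s => s == "progress")) = true
      · have h2 := (pv_M_two (x :: t)).mpr hany
        have hv : (t.map pvRank).foldl Nat.max (pvRank x) = 2 :=
          hM.trans (by omega)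
        simp [hall, hany, pvStatusByRank, hv]
      · have h2 : ¬ 2 ≤ ((x :: t).map pvRank).foldl Nat.max 0 :=
          fun h => hany ((pv_M_two (x :: t)).mp h)
        have hv : (t.map pvRank).foldl Nat.max (pvRank x) = 1 :=
          hM.trans (by omega)
        simp [hall, hany, pvStatusByRank, hv]
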